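-- pv_equiv track=rewrite | github.com/longduonglq/SnackCompiler | pa4bench/program_6_1.py | evenDigitAverage
-- ===== SOURCE A (Python) =====
-- def evenDigitAverage(x:int) -> int:
--     s:int = 0
--     count:int = 0
--     temp:int = 0
--     temp = x
--     while x > 0:
--         if x % 10 % 2 == 0:
--             s = s + x % 10
--             count = count + 1
--         x = x // 10
--     if count == 0:
--         return 0
--     return s // count
-- ===== SOURCE B (Python) =====
-- def evenDigitAverage(x: int) -> int:
--     if x <= 0:
--         return 0
--     evens = [d for d in (ord(c) - 48 for c in str(x)) if d % 2 == 0]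
--     if not evens:
--         return 0
--     return sum(evens) // len(evens)
-- ===== Notes on version B (the rewrite author's own statement) =====
-- stated objective: idiomatic
-- what changed: Replaces the mod/div while-loop with running accumulators by a guard-then-collect shape: build the even-digit list from the decimal string form of x and aggregate it with sum/len once.
import Mathlib
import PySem

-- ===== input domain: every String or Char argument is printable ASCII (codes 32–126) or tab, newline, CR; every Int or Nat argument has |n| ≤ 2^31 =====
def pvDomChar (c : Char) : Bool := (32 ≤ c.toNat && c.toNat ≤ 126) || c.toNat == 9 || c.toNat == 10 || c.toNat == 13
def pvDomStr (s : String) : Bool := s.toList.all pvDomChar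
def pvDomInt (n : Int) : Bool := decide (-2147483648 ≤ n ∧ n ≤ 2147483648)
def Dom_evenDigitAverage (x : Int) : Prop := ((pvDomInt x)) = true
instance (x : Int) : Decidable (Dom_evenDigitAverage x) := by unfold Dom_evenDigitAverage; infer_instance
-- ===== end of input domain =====

-- B replaces A's mod/div while-loop with accumulators by a guard-then-collect shape over str(x) (idiomatic, same cost).

-- ===== PORT A =====
-- the 'while x > 0' loop, carrying (s, count); returns their final values
def evenDigitAverageLoop (x s count : Int) : Int × Int :=
  if h : 0 < x then
    if PySem.Int.mod (PySem.Int.mod x 10) 2 = 0 then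
      evenDigitAverageLoop (PySem.Int.floordiv x 10) (s + PySem.Int.mod x 10) (count + 1)
    else
      evenDigitAverageLoop (PySem.Int.floordiv x 10) s count
  else (s, count)
termination_by x.toNat
decreasing_by
  all_goals
    rw [PySem.Int.floordiv_eq_ediv_of_pos (by norm_num : (0:Int) < 10)]
    omega

def evenDigitAverage (x : Int) : Int :=
  let r := evenDigitAverageLoop x 0 0
  if r.2 = 0 then 0 else PySem.Int.floordiv r.1 r.2

-- ===== PORT B =====
def evenDigitAverage_alt (x : Int) : Int :=
  if x ≤ 0 then 0
  else
    let evens := ((PySem.Int.toChars x).map (fun c => (c.toNat : Int) - 48)).filter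
      (fun d => PySem.Int.mod d 2 == 0)
    if evens = [] then 0
    else PySem.Int.floordiv evens.sum (evens.length : Int)

-- ===== PRECONDITION & SPEC =====
def Spec_evenDigitAverage (x : Int) (out : Int) : Prop := out = evenDigitAverage_alt x
instance (x : Int) (out : Int) : Decidable (Spec_evenDigitAverage x out) := by unfold Spec_evenDigitAverage; infer_instance

-- ===== CLAIM (what is proved, stated in full; the proofs are below) =====
def Claim_equal_evenDigitAverage : Prop := ∀ (x : Int), Dom_evenDigitAverage x → Spec_evenDigitAverage x (evenDigitAverage x)

-- ===== LEMMAS AND PROOFS =====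

-- the even digits of m (little-endian), the common value both programs aggregate
def pvEdig (m : Nat) : List Nat := (Nat.digits 10 m).filter (fun d => d % 2 = 0)

lemma pv_toDigitsCore_eq (f : Nat) : ∀ (n : Nat) (ds : List Char), 0 < n → n < f →
    Nat.toDigitsCore 10 f n ds = ((Nat.digits 10 n).map Nat.digitChar).reverse ++ ds := by
  induction f with
  | zero => intro n ds h hf; omega
  | succ f ih =>
    intro n ds hn hf
    rw [Nat.toDigitsCore]
    by_cases h10 : n / 10 = 0
    · simp [h10, Nat.digits_def' (by norm_num : 1 < 10) hn, Nat.digits_zero]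
    · have hlt : n / 10 < f := by
        have := Nat.div_lt_self hn (by norm_num : 1 < 10); omega
      simp only [h10, if_false]
      rw [ih (n / 10) _ (Nat.pos_of_ne_zero h10) hlt,
          Nat.digits_def' (by norm_num : 1 < 10) hn]
      simp

lemma pv_toChars_pos (m : Nat) (hm : 0 < m) :
    PySem.Int.toChars (m : Int) = ((Nat.digits 10 m).map Nat.digitChar).reverse := by
  simp only [PySem.Int.toChars, Int.toNat_natCast]
  rw [if_neg (by omega), Nat.toDigits, pv_toDigitsCore_eq (m + 1) m [] hm (by omega)]
  simp

lemma pv_digitChar_toNat (d : Nat) (h : d < 10) : (Nat.digitChar d).toNat = d + 48 := by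
  interval_cases d <;> decide

lemma pv_loop_eq (m : Nat) : ∀ (s c : Int),
    evenDigitAverageLoop (m : Int) s c = (s + ((pvEdig m).sum : Int), c + ((pvEdig m).length : Int)) := by
  induction m using Nat.strong_induction_on with
  | _ m ih =>
    intro s c
    rw [evenDigitAverageLoop]
    by_cases hm : 0 < m
    · have hcast : (0 : Int) < (m : Int) := by exact_mod_cast hm
      rw [dif_pos hcast]
      have hdlt : m / 10 < m := Nat.div_lt_self hm (by norm_num)
      have hdig : Nat.digits 10 m = m % 10 :: Nat.digits 10 (m / 10) :=
        Nat.digits_def' (by norm_num) hm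
      have hmod : PySem.Int.mod (m : Int) 10 = ((m % 10 : Nat) : Int) :=
        PySem.Int.mod_natCast m 10
      have hdiv : PySem.Int.floordiv (m : Int) 10 = ((m / 10 : Nat) : Int) :=
        PySem.Int.floordiv_natCast m 10
      have hmod2 : PySem.Int.mod ((m % 10 : Nat) : Int) 2 = ((m % 10 % 2 : Nat) : Int) :=
        PySem.Int.mod_natCast (m % 10) 2
      rw [hmod, hmod2, hdiv]
      by_cases he : m % 10 % 2 = 0
      · rw [if_pos (by exact_mod_cast congrArg (Nat.cast : Nat → Int) he),
            ih (m / 10) hdlt]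
        simp only [pvEdig, hdig, List.filter_cons, he]
        simp only [decide_true, if_true, List.sum_cons, List.length_cons]
        rw [Prod.mk.injEq]
        constructor <;> push_cast <;> ring
      · rw [if_neg (by exact_mod_cast fun h => he (by exact_mod_cast h)),
            ih (m / 10) hdlt]
        simp only [pvEdig, hdig, List.filter_cons, he]
        simp
    · have hm0 : m = 0 := by omega
      subst hm0
      rw [dif_neg (by norm_num)]
      simp [pvEdig]

lemma pv_evens_eq (m : Nat) (hm : 0 < m) :
    ((PySem.Int.toChars (m : Int)).map (fun c => (c.toNat : Int) - 48)).filter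
      (fun d => PySem.Int.mod d 2 == 0)
    = (pvEdig m).reverse.map (Nat.cast : Nat → Int) := by
  rw [pv_toChars_pos m hm, List.map_reverse, List.filter_reverse, List.map_map]
  rw [List.map_reverse]
  congr 1
  have h1 : (Nat.digits 10 m).map ((fun c => ((c : Char).toNat : Int) - 48) ∘ Nat.digitChar)
      = (Nat.digits 10 m).map (Nat.cast : Nat → Int) := by
    apply List.map_congr_left
    intro d hd
    have hlt : d < 10 := Nat.digits_lt_base (by norm_num) hd
    simp [Function.comp, pv_digitChar_toNat d hlt]
  rw [h1, List.filter_map]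
  unfold pvEdig
  congr 1
  apply List.filter_congr
  intro d hd
  have h2 : PySem.Int.mod (d : Int) 2 = ((d % 2 : Nat) : Int) := PySem.Int.mod_natCast d 2
  simp only [Function.comp, h2]
  by_cases hdd : d % 2 = 0
  · simp [hdd]
  · simp [hdd]; omega

-- ===== VERDICT (by name: the statement is the Claim_ definition above) =====
theorem evenDigitAverage_spec : Claim_equal_evenDigitAverage := by
  intro x _
  unfold Spec_evenDigitAverage evenDigitAverage evenDigitAverage_alt
  by_cases hx : x ≤ 0
  · rw [evenDigitAverageLoop]
    have hnx : ¬ (0 : Int) < x := by omega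
    simp [hx, hnx]
  · push Not at hx
    obtain ⟨m, rfl⟩ : ∃ m : Nat, x = (m : Int) := ⟨x.toNat, by omega⟩
    have hmpos : 0 < m := by exact_mod_cast hx
    simp only [pv_loop_eq m 0 0, pv_evens_eq m hmpos, zero_add]
    rw [if_neg (by omega : ¬ (m : Int) ≤ 0)]
    by_cases hE : pvEdig m = []
    · simp [hE]
    · have hlen : ((pvEdig m).length : Int) ≠ 0 := by
        simp [List.length_eq_zero_iff, hE]
      have hne : (pvEdig m).reverse.map (Nat.cast : Nat → Int) ≠ [] := by
        simpa using hE
      rw [if_neg hlen, if_neg hne]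
      congr 1
      · rw [List.map_reverse, List.sum_reverse, Nat.cast_list_sum]
      · simp
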